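-- pv_equiv track=rewrite | github.com/BLannoo/Advent-of-Code-2019 | day12/solution.py | accelerate_gold
-- ===== SOURCE A (Python) =====
-- def compare(value, reference):
--     if value < reference:
--         return -1
--     elif value == reference:
--         return 0
--     elif value > reference:
--         return 1
--     else:
--         raise Exception()
--
-- def accelerate_gold(state):
--     return tuple(
--         (
--             pos,
--             vel + sum(
--                 [
--                     compare(pos_other, pos)
--                     for pos_other, _ in state
--                 ]
--             )
--         )
--         for pos, vel in state
--     )
-- ===== SOURCE B (Python) =====
-- import bisect
--
-- def accelerate_gold(state):
--     # sort positions once; for each body, #greater - #less via binary search ranks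
--     positions = sorted(pos for pos, _ in state)
--     n = len(positions)
--     out = []
--     for pos, vel in state:
--         lo = bisect.bisect_left(positions, pos)
--         hi = bisect.bisect_right(positions, pos)
--         out.append((pos, vel + (n - hi) - lo))
--     return tuple(out)
-- ===== Notes on version B (the rewrite author's own statement) =====
-- stated objective: faster
-- what changed: Instead of summing sign comparisons against every other body for each body (nested scan), B sorts the positions once and obtains each body's count of greater/less positions via bisect ranks.
import Mathlib
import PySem

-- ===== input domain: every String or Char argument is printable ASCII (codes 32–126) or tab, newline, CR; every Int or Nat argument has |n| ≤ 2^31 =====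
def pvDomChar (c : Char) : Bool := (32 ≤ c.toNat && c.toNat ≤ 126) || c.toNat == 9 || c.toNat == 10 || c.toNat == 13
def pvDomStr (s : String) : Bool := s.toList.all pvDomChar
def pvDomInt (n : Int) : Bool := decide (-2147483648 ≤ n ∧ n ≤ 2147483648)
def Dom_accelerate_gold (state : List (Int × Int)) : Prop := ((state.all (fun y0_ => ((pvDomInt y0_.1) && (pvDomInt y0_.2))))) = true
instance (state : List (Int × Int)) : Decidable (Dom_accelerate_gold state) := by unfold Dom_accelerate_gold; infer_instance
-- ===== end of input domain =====

-- B replaces A's per-body scan over all other bodies by one sort of the positions plus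
-- binary-search ranks (bisect_left/bisect_right); objective: faster (O(n^2) → O(n log n)).

-- ===== PORT A =====
-- compare(value, reference); the trailing `raise Exception()` branch is unreachable by trichotomy
def pyCompare (value reference : Int) : Int :=
  if value < reference then -1
  else if value = reference then 0
  else 1

def accelerate_gold (state : List (Int × Int)) : List (Int × Int) :=
  state.map (fun pv =>
    (pv.1, pv.2 + (state.map (fun q => pyCompare q.1 pv.1)).sum))

-- ===== PORT B =====
def accelerate_gold_alt (state : List (Int × Int)) : List (Int × Int) :=
  let positions := PySem.List.sorted (state.map (fun pv => pv.1)) (fun x => x) false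
  let n := positions.length
  state.map (fun pv =>
    let lo := PySem.List.bisectLeft positions pv.1
    let hi := PySem.List.bisectRight positions pv.1
    (pv.1, pv.2 + ((n : Int) - (hi : Int)) - (lo : Int)))

-- ===== PRECONDITION & SPEC =====
def Spec_accelerate_gold (state : List (Int × Int)) (out : List (Int × Int)) : Prop := out = accelerate_gold_alt state
instance (state : List (Int × Int)) (out : List (Int × Int)) : Decidable (Spec_accelerate_gold state out) := by unfold Spec_accelerate_gold; infer_instance

-- ===== CLAIM (what is proved, stated in full; the proofs are below) =====
def Claim_equal_accelerate_gold : Prop := ∀ (state : List (Int × Int)), Dom_accelerate_gold state → Spec_accelerate_gold state (accelerate_gold state)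

-- ===== LEMMAS AND PROOFS =====

-- A's inner sum of compare-signs is (#greater) − (#less)
theorem sum_pyCompare (l : List (Int × Int)) (p : Int) :
    (l.map (fun q => pyCompare q.1 p)).sum
      = (l.countP (fun q => decide (p < q.1)) : Int)
        - (l.countP (fun q => decide (q.1 < p)) : Int) := by
  induction l with
  | nil => simp
  | cons a t ih =>
    simp only [List.map_cons, List.sum_cons, List.countP_cons]
    rw [ih]
    rcases lt_trichotomy a.1 p with h | h | h
    · have h1 : ¬ (p < a.1) := asymm h
      simp [pyCompare, h, h1]
      omega
    · subst h
      simp [pyCompare]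
    · have h1 : ¬ (a.1 < p) := asymm h
      have h2 : a.1 ≠ p := LT.lt.ne' h
      simp [pyCompare, h, h1, h2]
      omega

-- bisect_left on a sorted list counts the elements strictly below x
theorem bisectLeft_eq_countP (xs : List Int) (x : Int)
    (h : xs.Pairwise (· ≤ ·)) :
    PySem.List.bisectLeft xs x = xs.countP (fun y => decide (y < x)) := by
  obtain ⟨hk, hlo, hhi⟩ := PySem.List.bisectLeft_spec xs x h
  set k := PySem.List.bisectLeft xs x with hkdef
  have h1 : (xs.take k).countP (fun y => decide (y < x)) = (xs.take k).length := by
    apply List.countP_eq_length.mpr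
    intro a ha
    obtain ⟨j, hj, rfl⟩ := List.getElem_of_mem ha
    have hj' : j < k ∧ j < xs.length := by
      simpa [List.length_take, Nat.lt_min] using hj
    rw [List.getElem_take]
    exact decide_eq_true (hlo j hj'.2 hj'.1)
  have h2 : (xs.drop k).countP (fun y => decide (y < x)) = 0 := by
    apply List.countP_eq_zero.mpr
    intro a ha
    obtain ⟨j, hj, rfl⟩ := List.getElem_of_mem ha
    have hj' : k + j < xs.length := by
      have := hj; simp [List.length_drop] at this; omega
    rw [List.getElem_drop]
    simp only [decide_eq_true_eq, not_lt]
    exact hhi (k + j) hj' (Nat.le_add_right _ _)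
  have hsum : xs.countP (fun y => decide (y < x))
      = (xs.take k).countP (fun y => decide (y < x))
        + (xs.drop k).countP (fun y => decide (y < x)) := by
    rw [← List.countP_append, List.take_append_drop]
  rw [hsum, h1, h2, List.length_take, Nat.min_eq_left hk, Nat.add_zero]

-- bisect_right on a sorted list counts the elements ≤ x
theorem bisectRight_eq_countP (xs : List Int) (x : Int)
    (h : xs.Pairwise (· ≤ ·)) :
    PySem.List.bisectRight xs x = xs.countP (fun y => decide (y ≤ x)) := by
  obtain ⟨hk, hlo, hhi⟩ := PySem.List.bisectRight_spec xs x h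
  set k := PySem.List.bisectRight xs x with hkdef
  have h1 : (xs.take k).countP (fun y => decide (y ≤ x)) = (xs.take k).length := by
    apply List.countP_eq_length.mpr
    intro a ha
    obtain ⟨j, hj, rfl⟩ := List.getElem_of_mem ha
    have hj' : j < k ∧ j < xs.length := by
      simpa [List.length_take, Nat.lt_min] using hj
    rw [List.getElem_take]
    exact decide_eq_true (hlo j hj'.2 hj'.1)
  have h2 : (xs.drop k).countP (fun y => decide (y ≤ x)) = 0 := by
    apply List.countP_eq_zero.mpr
    intro a ha
    obtain ⟨j, hj, rfl⟩ := List.getElem_of_mem ha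
    have hj' : k + j < xs.length := by
      have := hj; simp [List.length_drop] at this; omega
    rw [List.getElem_drop]
    simp only [decide_eq_true_eq, not_le]
    exact hhi (k + j) hj' (Nat.le_add_right _ _)
  have hsum : xs.countP (fun y => decide (y ≤ x))
      = (xs.take k).countP (fun y => decide (y ≤ x))
        + (xs.drop k).countP (fun y => decide (y ≤ x)) := by
    rw [← List.countP_append, List.take_append_drop]
  rw [hsum, h1, h2, List.length_take, Nat.min_eq_left hk, Nat.add_zero]

-- ===== VERDICT (by name: the statement is the Claim_ definition above) =====
theorem accelerate_gold_spec : Claim_equal_accelerate_gold := by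
  intro state _
  unfold Spec_accelerate_gold accelerate_gold accelerate_gold_alt
  apply List.map_congr_left
  intro pv _
  set positions := PySem.List.sorted (state.map (fun pv => pv.1)) (fun x => x) false with hpos
  have hpw : positions.Pairwise (· ≤ ·) := by
    simpa using PySem.List.sorted_pairwise (state.map (fun pv => pv.1)) (fun x => x)
  have hperm : positions.Perm (state.map (fun pv => pv.1)) :=
    PySem.List.sorted_perm _ _ _
  have hclo : positions.countP (fun y => decide (y < pv.1))
      = state.countP (fun q => decide (q.1 < pv.1)) := by
    rw [hperm.countP_eq, List.countP_map]; rfl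
  have hchi : positions.countP (fun y => decide (y ≤ pv.1))
      = state.countP (fun q => decide (q.1 ≤ pv.1)) := by
    rw [hperm.countP_eq, List.countP_map]; rfl
  have hlen : positions.length = state.length := by
    simpa using hperm.length_eq
  have hcompl : state.length
      = state.countP (fun q => decide (q.1 ≤ pv.1))
        + state.countP (fun q => decide (pv.1 < q.1)) := by
    have := List.length_eq_countP_add_countP (l := state) (fun q => decide (q.1 ≤ pv.1))
    rw [this]
    congr 1
    apply List.countP_congr
    intro a _
    simp [not_le]
  rw [sum_pyCompare, bisectLeft_eq_countP _ _ hpw, bisectRight_eq_countP _ _ hpw,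
    hclo, hchi, hlen]
  have h2 : pv.2 + ((state.countP (fun q => decide (pv.1 < q.1)) : Int)
        - (state.countP (fun q => decide (q.1 < pv.1)) : Int))
      = pv.2 + ((state.length : Int) - (state.countP (fun q => decide (q.1 ≤ pv.1)) : Int))
        - (state.countP (fun q => decide (q.1 < pv.1)) : Int) := by
    have : (state.length : Int) = (state.countP (fun q => decide (q.1 ≤ pv.1)) : Int)
        + (state.countP (fun q => decide (pv.1 < q.1)) : Int) := by exact_mod_cast hcompl
    omega
  exact congrArg (Prod.mk pv.1) h2
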